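-- pv_equiv track=rewrite | github.com/sphinfo/CloudeBIM-RoutePlan | route_planner/plan.py | get_direction_block
-- ===== SOURCE A (Python) =====
-- import math
--
-- def get_direction_block(sorted_boundary: list, a_x, a_y, a_z):
--     direction_block = {}
--     for coord in sorted_boundary:
--         if coord[0] <= a_x and coord[1] <= a_y:
--             direction_block.setdefault('ld', [])
--             direction_block['ld'].append(coord)
--         elif coord[0] > a_x and coord[1] <= a_y:
--             direction_block.setdefault('rd', [])
--             direction_block['rd'].append(coord)
--         elif coord[0] > a_x and coord[1] > a_y:
--             direction_block.setdefault('ru', [])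
--             direction_block['ru'].append(coord)
--         else:
--             direction_block.setdefault('lu', [])
--             direction_block['lu'].append(coord)
--     for k in list(direction_block.keys()):
--         v = direction_block[k]
--         if len(v) > 1:
--             direction_block[k] = sorted(v, key=lambda x: -(math.sqrt(math.pow(a_x - float(x[0]), 2) + math.pow(a_y - float(x[1]), 2) + math.pow(a_z - float(x[2]), 2))))[0]
--         else:
--             direction_block[k] = v[0]
--     return direction_block
-- ===== SOURCE B (Python) =====
-- import math
--
--
-- def get_direction_block(sorted_boundary: list, a_x, a_y, a_z):
--     # One pass with a running maximum per quadrant instead of partition + sort.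
--     best = {}
--     for coord in sorted_boundary:
--         d = math.sqrt(math.pow(a_x - float(coord[0]), 2) + math.pow(a_y - float(coord[1]), 2) + math.pow(a_z - float(coord[2]), 2))
--         if coord[0] <= a_x:
--             key = 'ld' if coord[1] <= a_y else 'lu'
--         else:
--             key = 'rd' if coord[1] <= a_y else 'ru'
--         cur = best.get(key)
--         if cur is None or d > cur[0]:
--             best[key] = (d, coord)
--     return {k: v[1] for k, v in best.items()}
-- ===== Notes on version B (the rewrite author's own statement) =====
-- stated objective: alternative
-- what changed: A partitions coords into four per-quadrant lists and stable-sorts each by descending float distance to take its head; B makes a single pass keeping one running (distance, coord) maximum per quadrant (strict '>' preserves A's first-among-ties choice), with no partition lists and no sort.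
-- outside the precondition, e.g. on get_direction_block([[1, 2]], 0, 0, 0): A returns {'ru': [1, 2]}, B raises IndexError
import Mathlib
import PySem

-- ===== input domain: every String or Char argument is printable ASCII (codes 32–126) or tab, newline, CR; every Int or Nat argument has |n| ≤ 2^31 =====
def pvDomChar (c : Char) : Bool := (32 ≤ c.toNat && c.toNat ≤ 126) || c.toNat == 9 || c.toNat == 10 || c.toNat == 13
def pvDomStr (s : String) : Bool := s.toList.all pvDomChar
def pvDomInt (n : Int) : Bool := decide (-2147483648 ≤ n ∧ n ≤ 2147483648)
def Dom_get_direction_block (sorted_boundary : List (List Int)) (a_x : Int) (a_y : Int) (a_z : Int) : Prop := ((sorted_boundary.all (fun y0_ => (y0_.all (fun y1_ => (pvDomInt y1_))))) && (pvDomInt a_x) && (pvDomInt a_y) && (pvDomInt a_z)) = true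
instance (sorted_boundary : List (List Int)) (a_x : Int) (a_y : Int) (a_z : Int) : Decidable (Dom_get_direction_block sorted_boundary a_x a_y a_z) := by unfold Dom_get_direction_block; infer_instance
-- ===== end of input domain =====

-- B replaces A's partition-into-four-lists + per-quadrant sort by a single pass keeping a
-- running farthest coordinate per quadrant (objective: alternative decomposition, one pass, no sort).
--
-- Float model shared by both ports: on this domain every float operand of A's distance formula is an
-- exact integer (|difference| ≤ 2^33 < 2^53), so math.pow(d,2), float '+' and math.sqrt are
-- round-to-nearest-even of exact integer intermediates; pvRoundInt/pvSqrtF compute exactly that in ℚ.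

-- round a nonnegative integer to the nearest 53-bit float value (ties to even), as an integer
def pvRoundInt (n : Nat) : Nat :=
  if n < 2 ^ 53 then n
  else
    let e := Nat.log2 n
    let u := 2 ^ (e - 52)
    let q := n / u
    let r := n % u
    (if 2 * r < u then q else if u < 2 * r then q + 1 else if q % 2 = 0 then q else q + 1) * u

-- round-to-nearest float of the real square root of an exact-integer float value n
def pvSqrtF (n : Nat) : ℚ :=
  if n = 0 then 0
  else
    let f := Nat.log2 n / 2
    let N := n * 2 ^ (104 - 2 * f)
    let s := Nat.sqrt N
    (if 4 * N < (2 * s + 1) ^ 2 then (s : ℚ) else (s : ℚ) + 1) / 2 ^ (52 - f)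

-- math.sqrt(math.pow(a_x-x0,2) + math.pow(a_y-x1,2) + math.pow(a_z-x2,2)) as an exact rational
def pvDist (a_x a_y a_z : Int) (c : List Int) : ℚ :=
  let dx := a_x - PySem.List.pyGetD c 0 0
  let dy := a_y - PySem.List.pyGetD c 1 0
  let dz := a_z - PySem.List.pyGetD c 2 0
  let px := pvRoundInt (dx * dx).toNat
  let py := pvRoundInt (dy * dy).toNat
  let pz := pvRoundInt (dz * dz).toNat
  pvSqrtF (pvRoundInt (pvRoundInt (px + py) + pz))

-- ===== PORT A =====
def get_direction_block (sorted_boundary : List (List Int)) (a_x : Int) (a_y : Int) (a_z : Int) : List (String × List Int) :=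
  let db : PySem.Dict String (List (List Int)) :=
    sorted_boundary.foldl (fun d coord =>
      let x := PySem.List.pyGetD coord 0 0
      let y := PySem.List.pyGetD coord 1 0
      if x ≤ a_x ∧ y ≤ a_y then d.modify "ld" [] (fun v => v ++ [coord])
      else if a_x < x ∧ y ≤ a_y then d.modify "rd" [] (fun v => v ++ [coord])
      else if a_x < x ∧ a_y < y then d.modify "ru" [] (fun v => v ++ [coord])
      else d.modify "lu" [] (fun v => v ++ [coord])) PySem.Dict.empty
  db.items.map (fun kv =>
    (kv.1, if 1 < kv.2.length
           then PySem.List.pyGetD (PySem.List.sorted kv.2 (fun c => -(pvDist a_x a_y a_z c))) 0 []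
           else PySem.List.pyGetD kv.2 0 []))

-- ===== PORT B =====
def pvQuad (a_x a_y : Int) (coord : List Int) : String :=
  if PySem.List.pyGetD coord 0 0 ≤ a_x then
    (if PySem.List.pyGetD coord 1 0 ≤ a_y then "ld" else "lu")
  else
    (if PySem.List.pyGetD coord 1 0 ≤ a_y then "rd" else "ru")

def get_direction_block_alt (sorted_boundary : List (List Int)) (a_x : Int) (a_y : Int) (a_z : Int) : List (String × List Int) :=
  let best : PySem.Dict String (ℚ × List Int) :=
    sorted_boundary.foldl (fun b coord =>
      let d := pvDist a_x a_y a_z coord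
      let k := pvQuad a_x a_y coord
      match b.get? k with
      | none => b.insert k (d, coord)
      | some cur => if cur.1 < d then b.insert k (d, coord) else b) PySem.Dict.empty
  best.items.map (fun kv => (kv.1, kv.2.2))

-- ===== PRECONDITION & SPEC =====
-- Pre_ requires every coordinate triple to have length ≥ 3: Python A raises IndexError on shorter
-- coords except when a length-2 coord lands alone in its quadrant (its third component is then never
-- read); B evaluates the distance of every coord, so it raises there and those inputs are excluded.
def Pre_get_direction_block (sorted_boundary : List (List Int)) (a_x : Int) (a_y : Int) (a_z : Int) : Prop :=
  ∀ c ∈ sorted_boundary, 3 ≤ c.length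
instance (sorted_boundary : List (List Int)) (a_x : Int) (a_y : Int) (a_z : Int) : Decidable (Pre_get_direction_block sorted_boundary a_x a_y a_z) := by unfold Pre_get_direction_block; infer_instance

def pvWitness_get_direction_block : List (List Int) × Int × Int × Int :=
  ([[1, 2, 3], [4, 5, 6], [-7, 8, 9]], 0, 0, 0)

def Spec_get_direction_block (sorted_boundary : List (List Int)) (a_x : Int) (a_y : Int) (a_z : Int) (out : List (String × List Int)) : Prop := out = get_direction_block_alt sorted_boundary a_x a_y a_z
instance (sorted_boundary : List (List Int)) (a_x : Int) (a_y : Int) (a_z : Int) (out : List (String × List Int)) : Decidable (Spec_get_direction_block sorted_boundary a_x a_y a_z out) := by unfold Spec_get_direction_block; infer_instance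

-- ===== CLAIM (what is proved, stated in full; the proofs are below) =====
def Claim_equal_get_direction_block : Prop := ∀ (sorted_boundary : List (List Int)) (a_x : Int) (a_y : Int) (a_z : Int), Dom_get_direction_block sorted_boundary a_x a_y a_z → Pre_get_direction_block sorted_boundary a_x a_y a_z → Spec_get_direction_block sorted_boundary a_x a_y a_z (get_direction_block sorted_boundary a_x a_y a_z)


-- ===== LEMMAS AND PROOFS =====

-- the running "farthest so far" pair B maintains for one quadrant's list of coords
def pvRunBest (φ : List Int → ℚ) : List (List Int) → ℚ × List Int
  | [] => (0, [])
  | c :: t => t.foldl (fun p c' => if p.1 < φ c' then (φ c', c') else p) (φ c, c)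

theorem pvRunBest_fst_aux (φ : List Int → ℚ) (t : List (List Int)) (p : ℚ × List Int)
    (h : p.1 = φ p.2) :
    (t.foldl (fun p c' => if p.1 < φ c' then (φ c', c') else p) p).1
      = φ (t.foldl (fun p c' => if p.1 < φ c' then (φ c', c') else p) p).2 := by
  induction t generalizing p with
  | nil => exact h
  | cons c t ih =>
    simp only [List.foldl_cons]
    apply ih
    split <;> simp [h]

theorem pvRunBest_fst (φ : List Int → ℚ) (v : List (List Int)) (hv : v ≠ []) :
    (pvRunBest φ v).1 = φ (pvRunBest φ v).2 := by
  match v with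
  | c :: t => exact pvRunBest_fst_aux φ t (φ c, c) rfl

theorem pvRunBest_append (φ : List Int → ℚ) (v : List (List Int)) (c : List Int) (hv : v ≠ []) :
    pvRunBest φ (v ++ [c])
      = (if (pvRunBest φ v).1 < φ c then (φ c, c) else pvRunBest φ v) := by
  match v with
  | c0 :: t => simp [pvRunBest, List.foldl_append]

theorem pvSortHead (φ : List Int → ℚ) (v : List (List Int)) (hv : v ≠ []) :
    (PySem.List.sorted v (fun c => -(φ c))).headD [] = (pvRunBest φ v).2 := by
  induction v using List.reverseRecOn with
  | nil => exact absurd rfl hv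
  | append_singleton v' c ih =>
    rw [PySem.List.sorted_eq_foldl_insertBy, List.foldl_append,
        ← PySem.List.sorted_eq_foldl_insertBy]
    by_cases h' : v' = []
    · subst h'
      simp [PySem.List.sorted, PySem.List.insertBy, pvRunBest]
    · have hs : PySem.List.sorted v' (fun c => -(φ c)) ≠ [] := by
        simpa [PySem.List.sorted_eq_nil_iff] using h'
      obtain ⟨m, rest, hm⟩ := List.exists_cons_of_ne_nil hs
      have ihm : m = (pvRunBest φ v').2 := by
        have := ih h'
        rw [hm] at this
        simpa using this
      have hfst := pvRunBest_fst φ v' h'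
      rw [List.foldl_cons, List.foldl_nil, hm, pvRunBest_append φ v' c h']
      simp only [PySem.List.insertBy]
      by_cases hlt : (pvRunBest φ v').1 < φ c
      · have hneg : -(φ c) < -(φ m) := by
          rw [ihm, ← hfst] at *
          linarith
        simp [hneg, hlt]
      · have hneg : ¬(φ (pvRunBest φ v').2 < φ c) := by
          rw [← hfst]; exact hlt
        simp [hneg, hlt, ihm]

-- B's dict lookup seen through the item-wise relation with A's dict
theorem pvGetRel (φ : List Int → ℚ) (d : PySem.Dict String (List (List Int)))
    (b : PySem.Dict String (ℚ × List Int))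
    (hb : b.items = d.items.map (fun kv => (kv.1, pvRunBest φ kv.2))) (k : String) :
    b.get? k = (d.get? k).map (pvRunBest φ) := by
  simp only [PySem.Dict.get?, hb, List.find?_map]
  have h : ((fun p => p.1 == k) ∘ fun (kv : String × List (List Int)) => (kv.1, pvRunBest φ kv.2))
      = (fun (p : String × List (List Int)) => p.1 == k) := rfl
  rw [h]
  cases List.find? (fun (p : String × List (List Int)) => p.1 == k) d.items <;> simp

-- A's four-way branch computes exactly B's quadrant key
theorem pvStepA_eq (a_x a_y : Int) (coord : List Int)
    (d : PySem.Dict String (List (List Int))) :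
    (if PySem.List.pyGetD coord 0 0 ≤ a_x ∧ PySem.List.pyGetD coord 1 0 ≤ a_y then
       d.modify "ld" [] (fun v => v ++ [coord])
     else if a_x < PySem.List.pyGetD coord 0 0 ∧ PySem.List.pyGetD coord 1 0 ≤ a_y then
       d.modify "rd" [] (fun v => v ++ [coord])
     else if a_x < PySem.List.pyGetD coord 0 0 ∧ a_y < PySem.List.pyGetD coord 1 0 then
       d.modify "ru" [] (fun v => v ++ [coord])
     else d.modify "lu" [] (fun v => v ++ [coord]))
    = d.modify (pvQuad a_x a_y coord) [] (fun v => v ++ [coord]) := by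
  by_cases h1 : PySem.List.pyGetD coord 0 0 ≤ a_x
  · by_cases h2 : PySem.List.pyGetD coord 1 0 ≤ a_y
    · simp [pvQuad, h1, h2]
    · simp [pvQuad, h1, h2, not_lt.2 h1]
  · by_cases h2 : PySem.List.pyGetD coord 1 0 ≤ a_y
    · simp [pvQuad, h1, h2, not_le.1 h1]
    · simp [pvQuad, h1, h2, not_le.1 h1]

-- relation between A's dict of quadrant lists and B's dict of running bests after any prefix
theorem pvFoldRel (a_x a_y a_z : Int) (l : List (List Int))
    (d : PySem.Dict String (List (List Int))) (b : PySem.Dict String (ℚ × List Int))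
    (hb : b.items = d.items.map (fun kv => (kv.1, pvRunBest (pvDist a_x a_y a_z) kv.2)))
    (hne : ∀ kv ∈ d.items, kv.2 ≠ []) (hnd : d.keys.Nodup) :
    (l.foldl (fun b coord =>
      match b.get? (pvQuad a_x a_y coord) with
      | none => b.insert (pvQuad a_x a_y coord) (pvDist a_x a_y a_z coord, coord)
      | some cur => if cur.1 < pvDist a_x a_y a_z coord then
          b.insert (pvQuad a_x a_y coord) (pvDist a_x a_y a_z coord, coord) else b) b).items
    = ((l.foldl (fun d coord =>
      if PySem.List.pyGetD coord 0 0 ≤ a_x ∧ PySem.List.pyGetD coord 1 0 ≤ a_y then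
        d.modify "ld" [] (fun v => v ++ [coord])
      else if a_x < PySem.List.pyGetD coord 0 0 ∧ PySem.List.pyGetD coord 1 0 ≤ a_y then
        d.modify "rd" [] (fun v => v ++ [coord])
      else if a_x < PySem.List.pyGetD coord 0 0 ∧ a_y < PySem.List.pyGetD coord 1 0 then
        d.modify "ru" [] (fun v => v ++ [coord])
      else d.modify "lu" [] (fun v => v ++ [coord])) d).items.map
        (fun kv => (kv.1, pvRunBest (pvDist a_x a_y a_z) kv.2))) := by
  induction l generalizing d b with
  | nil => exact hb
  | cons coord l ih =>
    simp only [List.foldl_cons]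
    rw [pvStepA_eq a_x a_y coord d]
    set φ := pvDist a_x a_y a_z with hφ
    set k := pvQuad a_x a_y coord with hk
    have hget := pvGetRel φ d b hb k
    have hmod : d.modify k [] (fun v => v ++ [coord]) = d.insert k (d.getD k [] ++ [coord]) := rfl
    cases hdk : d.get? k with
    | none =>
      have hbk : b.get? k = none := by rw [hget, hdk]; rfl
      have hcd : d.contains k = false := by
        rw [PySem.Dict.contains_eq_isSome_get?, hdk]; rfl
      have hcb : b.contains k = false := by
        rw [PySem.Dict.contains_eq_isSome_get?, hbk]; rfl
      simp only [hbk]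
      apply ih
      · rw [hmod, PySem.Dict.getD_of_get?_eq_none d [] hdk,
            PySem.Dict.items_insert_of_not_contains d _ hcd,
            PySem.Dict.items_insert_of_not_contains b _ hcb, hb]
        simp [pvRunBest]
      · intro kv hkv
        rw [hmod, PySem.Dict.getD_of_get?_eq_none d [] hdk,
            PySem.Dict.items_insert_of_not_contains d _ hcd] at hkv
        rcases List.mem_append.1 hkv with h | h
        · exact hne kv h
        · simp at h; subst h; simp
      · rw [hmod]
        exact PySem.Dict.nodup_keys_insert d k _ hnd
    | some v =>
      have hvne : v ≠ [] := by
        have hmem : (k, v) ∈ d.items := PySem.Dict.mem_items_of_get?_eq_some d hdk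
        exact hne (k, v) hmem
      have hbk : b.get? k = some (pvRunBest φ v) := by rw [hget, hdk]; rfl
      have hcd : d.contains k = true := by
        rw [PySem.Dict.contains_eq_isSome_get?, hdk]; rfl
      have hcb : b.contains k = true := by
        rw [PySem.Dict.contains_eq_isSome_get?, hbk]; rfl
      have hitems : (d.insert k (v ++ [coord])).items
          = d.items.map (fun p => if p.1 == k then (k, v ++ [coord]) else p) :=
        PySem.Dict.items_insert_of_contains d _ hcd
      have hrb := pvRunBest_append φ v coord hvne
      simp only [hbk]
      by_cases hlt : (pvRunBest φ v).1 < φ coord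
      · rw [if_pos hlt]
        apply ih
        · rw [hmod, PySem.Dict.getD_of_get?_eq_some d [] hdk,
              PySem.Dict.items_insert_of_contains b _ hcb, hitems, hb,
              List.map_map, List.map_map]
          apply List.map_congr_left
          intro p _
          by_cases hpk : p.1 = k
          · simp [hpk, hrb, hlt]
          · simp [hpk]
        · intro kv hkv
          rw [hmod, PySem.Dict.getD_of_get?_eq_some d [] hdk, hitems] at hkv
          rcases List.mem_map.1 hkv with ⟨p, hp, hpe⟩
          by_cases hpk : p.1 = k
          · simp [hpk] at hpe; subst hpe; simp
          · simp [hpk] at hpe; subst hpe; exact hne p hp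
        · rw [hmod]
          exact PySem.Dict.nodup_keys_insert d k _ hnd
      · rw [if_neg hlt]
        apply ih
        · rw [hmod, PySem.Dict.getD_of_get?_eq_some d [] hdk, hitems, hb,
              List.map_map]
          apply List.map_congr_left
          intro p hp
          by_cases hpk : p.1 = k
          · have hpv : p.2 = v := by
              have hq : d.get? p.1 = some p.2 :=
                PySem.Dict.get?_of_mem_items d (by simpa using hp) hnd
              rw [hpk, hdk] at hq
              exact (Option.some_inj.1 hq).symm
            simp [hpk, hrb, hlt, hpv]
          · simp [hpk]
        · intro kv hkv
          rw [hmod, PySem.Dict.getD_of_get?_eq_some d [] hdk, hitems] at hkv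
          rcases List.mem_map.1 hkv with ⟨p, hp, hpe⟩
          by_cases hpk : p.1 = k
          · simp [hpk] at hpe; subst hpe; simp
          · simp [hpk] at hpe; subst hpe; exact hne p hp
        · rw [hmod]
          exact PySem.Dict.nodup_keys_insert d k _ hnd

-- ===== VERDICT (by name: the statement is the Claim_ definition above) =====
theorem get_direction_block_spec : Claim_equal_get_direction_block := by
  intro sb a_x a_y a_z _hdom _hpre
  unfold Spec_get_direction_block
  unfold get_direction_block get_direction_block_alt
  dsimp only
  rw [pvFoldRel a_x a_y a_z sb PySem.Dict.empty PySem.Dict.empty rfl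
        (by intro kv h; cases h) PySem.Dict.nodup_keys_empty,
      List.map_map]
  apply List.map_congr_left
  intro kv _
  rcases kv with ⟨k, v⟩
  match v with
  | [] => simp [pvRunBest, PySem.List.pyGetD_zero]
  | [c] => simp [pvRunBest, PySem.List.pyGetD_zero]
  | c1 :: c2 :: t =>
    have hlen : 1 < (c1 :: c2 :: t).length := by simp
    have hhd := pvSortHead (pvDist a_x a_y a_z) (c1 :: c2 :: t) (by simp)
    have hne : PySem.List.sorted (c1 :: c2 :: t) (fun c => -(pvDist a_x a_y a_z c)) ≠ [] := by
      simp [PySem.List.sorted_eq_nil_iff]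
    obtain ⟨m, rest, hm⟩ := List.exists_cons_of_ne_nil hne
    simp only [PySem.List.pyGetD_zero]
    rw [if_pos hlen, hm]
    rw [hm] at hhd
    simpa using hhd
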